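-- pv_equiv track=rewrite | github.com/KH0BZ4/IDEH-CTF-2026 | DFIR/last_s/solution.py | score_plane
-- ===== SOURCE A (Python) =====
-- def score_plane(plane_bytes, width, height):
--     score = 0
--     # Compare row N with row N+1
--     for y in range(height - 1):
--         row1 = plane_bytes[y*width : (y+1)*width]
--         row2 = plane_bytes[(y+1)*width : (y+2)*width]
--         # Sum absolute differences
--         for x in range(width):
--             diff = abs(row1[x] - row2[x])
--             score += diff
--     return score
-- ===== SOURCE B (Python) =====
-- def score_plane(plane_bytes, width, height):
--     if width <= 0 or height <= 1:
--         return 0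
--     return sum(abs(plane_bytes[i] - plane_bytes[i + width])
--                for i in range((height - 1) * width))
-- ===== Notes on version B (the rewrite author's own statement) =====
-- stated objective: simpler
-- what changed: Replaced the nested per-row loops with their slice allocations by one flat loop over vertical neighbour pairs plane_bytes[i] vs plane_bytes[i+width], summing |difference| in a single pass.
import Mathlib
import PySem

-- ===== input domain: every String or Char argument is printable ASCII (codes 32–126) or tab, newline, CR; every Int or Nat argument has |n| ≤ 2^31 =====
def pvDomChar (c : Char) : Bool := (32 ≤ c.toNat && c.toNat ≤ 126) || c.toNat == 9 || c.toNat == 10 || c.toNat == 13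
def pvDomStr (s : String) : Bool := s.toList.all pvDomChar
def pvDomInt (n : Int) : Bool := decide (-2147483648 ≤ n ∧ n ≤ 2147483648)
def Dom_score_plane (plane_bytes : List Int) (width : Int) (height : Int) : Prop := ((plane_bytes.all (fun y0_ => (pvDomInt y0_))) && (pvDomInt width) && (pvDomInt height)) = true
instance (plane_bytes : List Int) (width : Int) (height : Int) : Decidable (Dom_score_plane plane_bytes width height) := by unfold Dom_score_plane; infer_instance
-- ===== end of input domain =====

-- B replaces A's nested per-row loops (with their slice allocations) by one flat pass over
-- vertical neighbour pairs plane_bytes[i] / plane_bytes[i+width]; objective: simpler.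

-- ===== PORT A =====
def score_plane (plane_bytes : List Int) (width : Int) (height : Int) : Int :=
  (PySem.List.pyRange 0 (height - 1) 1).foldl (fun score y =>
    let row1 := PySem.List.slice plane_bytes (some (y * width)) (some ((y + 1) * width))
    let row2 := PySem.List.slice plane_bytes (some ((y + 1) * width)) (some ((y + 2) * width))
    (PySem.List.pyRange 0 width 1).foldl (fun score x =>
      score + |PySem.List.pyGetD row1 x 0 - PySem.List.pyGetD row2 x 0|) score) 0

-- ===== PORT B =====
def score_plane_alt (plane_bytes : List Int) (width : Int) (height : Int) : Int :=
  if width ≤ 0 ∨ height ≤ 1 then 0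
  else
    ((PySem.List.pyRange 0 ((height - 1) * width) 1).map (fun i =>
      |PySem.List.pyGetD plane_bytes i 0 - PySem.List.pyGetD plane_bytes (i + width) 0|)).sum

-- ===== PRECONDITION & SPEC =====
-- Pre_ excludes exactly the inputs on which A raises IndexError: width > 0, height > 1 and
-- the buffer shorter than width*height (row2[x] then runs past the short slice).
def Pre_score_plane (plane_bytes : List Int) (width : Int) (height : Int) : Prop :=
  0 < width → 1 < height → width * height ≤ (plane_bytes.length : Int)
instance (plane_bytes : List Int) (width : Int) (height : Int) : Decidable (Pre_score_plane plane_bytes width height) := by unfold Pre_score_plane; infer_instance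
def pvWitness_score_plane : List Int × Int × Int := ([3, 1, 4, 1, 5, 9], 2, 3)

def Spec_score_plane (plane_bytes : List Int) (width : Int) (height : Int) (out : Int) : Prop := out = score_plane_alt plane_bytes width height
instance (plane_bytes : List Int) (width : Int) (height : Int) (out : Int) : Decidable (Spec_score_plane plane_bytes width height out) := by unfold Spec_score_plane; infer_instance

-- ===== CLAIM (what is proved, stated in full; the proofs are below) =====
def Claim_equal_score_plane : Prop := ∀ (plane_bytes : List Int) (width : Int) (height : Int), Dom_score_plane plane_bytes width height → Pre_score_plane plane_bytes width height → Spec_score_plane plane_bytes width height (score_plane plane_bytes width height)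

-- ===== LEMMAS AND PROOFS =====

theorem foldl_fixed_int {α : Type} (l : List α) (a : Int) :
    l.foldl (fun s _ => s) a = a := by
  induction l generalizing a with
  | nil => rfl
  | cons x xs ih => simp [List.foldl, ih]

-- flattening a double sum over a rectangle into one sum over range (m*w)
theorem sum_range_mul_flatten (g : Nat → Int) (m w : Nat) :
    ((List.range (m * w)).map g).sum
      = ((List.range m).map (fun y => ((List.range w).map (fun x => g (y * w + x))).sum)).sum := by
  induction m with
  | zero => simp
  | succ m ih =>
      have h1 : (m + 1) * w = m * w + w := by ring
      rw [h1, List.range_add, List.range_succ]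
      simp [List.map_append, List.sum_append, ih, Function.comp_def]

-- indexing into a row slice = indexing into the flat buffer
theorem getD_take_drop (pb : List Int) (a w x : Nat) (hx : x < w)
    (hlen : a + x < pb.length) :
    ((pb.drop a).take w).getD x 0 = pb.getD (a + x) 0 := by
  have hlt : x < ((pb.drop a).take w).length := by
    simp [List.length_take, List.length_drop]; omega
  rw [List.getD_eq_getElem _ _ hlt, List.getD_eq_getElem _ _ hlen]
  simp [List.getElem_take, List.getElem_drop]

-- ===== VERDICT (by name: the statement is the Claim_ definition above) =====
theorem score_plane_spec : Claim_equal_score_plane := by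
  intro pb width height _ hpre
  unfold Spec_score_plane score_plane score_plane_alt
  by_cases hdeg : width ≤ 0 ∨ height ≤ 1
  · rw [if_pos hdeg]
    rcases hdeg with hw | hh
    · have hin : PySem.List.pyRange 0 width 1 = [] :=
        PySem.List.pyRange_one_eq_nil (by omega)
      simp only [hin, List.foldl_nil]
      exact foldl_fixed_int _ 0
    · rw [show PySem.List.pyRange 0 (height - 1) 1 = [] from
        PySem.List.pyRange_one_eq_nil (by omega)]
      rfl
  · rw [if_neg hdeg]
    obtain ⟨hw, hh⟩ : 0 < width ∧ 1 < height := by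
      rw [not_or] at hdeg; exact ⟨by omega, by omega⟩
    -- move to natural numbers
    obtain ⟨w, hwv⟩ : ∃ w : Nat, width = (w : Int) := ⟨width.toNat, by omega⟩
    obtain ⟨h, hhv⟩ : ∃ h : Nat, height = (h : Int) := ⟨height.toNat, by omega⟩
    subst hwv hhv
    have hwpos : 0 < w := by exact_mod_cast hw
    have hhpos : 1 < h := by exact_mod_cast hh
    have hlen : w * h ≤ pb.length := by exact_mod_cast hpre hw hh
    -- abbreviate the flat per-index term
    set g : Nat → Int := fun i => |pb.getD i 0 - pb.getD (i + w) 0| with hg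
    -- B's side
    have hBsum :
        ((PySem.List.pyRange 0 (((h : Int) - 1) * w) 1).map (fun i =>
          |PySem.List.pyGetD pb i 0 - PySem.List.pyGetD pb (i + w) 0|)).sum
        = ((List.range ((h - 1) * w)).map g).sum := by
      have hcast : ((h : Int) - 1) * (w : Int) = (((h - 1) * w : Nat) : Int) := by
        push_cast [Nat.cast_sub (by omega : 1 ≤ h)]; ring
      rw [hcast, PySem.List.pyRange_one, List.map_map]
      congr 1
      apply List.map_congr_left
      intro x hx
      have hxw : (x : Int) + (w : Int) = (((x + w : Nat)) : Int) := by push_cast; ring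
      simp only [Function.comp_apply, zero_add]
      rw [PySem.List.pyGetD_natCast, hxw, PySem.List.pyGetD_natCast, hg]
    rw [hBsum, sum_range_mul_flatten g (h - 1) w]
    -- A's side: turn the nested foldl into the double sum
    have hA :
        (PySem.List.pyRange 0 ((h : Int) - 1) 1).foldl (fun score y =>
          let row1 := PySem.List.slice pb (some (y * w)) (some ((y + 1) * w))
          let row2 := PySem.List.slice pb (some ((y + 1) * w)) (some ((y + 2) * w))
          (PySem.List.pyRange 0 (w : Int) 1).foldl (fun score x =>
            score + |PySem.List.pyGetD row1 x 0 - PySem.List.pyGetD row2 x 0|) score) 0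
        = ((List.range (h - 1)).map (fun y =>
            ((List.range w).map (fun x => g (y * w + x))).sum)).sum := by
      have hrange : PySem.List.pyRange 0 ((h : Int) - 1) 1
          = (List.range (h - 1)).map (fun k : Nat => (k : Int)) := by
        rw [PySem.List.pyRange_one]
        have ht : ((h : Int) - 1 - 0).toNat = h - 1 := by omega
        rw [ht]
        simp only [zero_add]
      rw [hrange, List.foldl_map]
      -- rewrite the body pointwise, then fold-as-sum
      rw [PySem.List.foldl_congr_mem'
        (g := fun score (y : Nat) => score + ((List.range w).map (fun x => g (y * w + x))).sum)]
      · rw [PySem.List.foldl_add, zero_add]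
      · intro y hy score
        have hy' : y < h - 1 := List.mem_range.mp hy
        -- inner loop as a sum
        rw [PySem.List.pyRange_one]
        simp only [Int.sub_zero, Int.toNat_natCast]
        rw [List.foldl_map, PySem.List.foldl_congr_mem'
          (g := fun score (x : Nat) => score + g (y * w + x))]
        · rw [PySem.List.foldl_add]
        · intro x hxm score'
          have hx : x < w := List.mem_range.mp hxm
          congr 1
          -- row1[x]
          have hb1 : (((y : Int)) * w) = (((y * w : Nat)) : Int) := by push_cast; ring
          have hb2 : (((y : Int)) + 1) * w = (((y * w + w : Nat)) : Int) := by push_cast; ring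
          have hb3 : (((y : Int)) + 2) * w = (((y * w + w + w : Nat)) : Int) := by push_cast; ring
          have h0x : ((0:Int) + (x:Int)) = ((x : Nat) : Int) := by ring
          rw [h0x, hb1, hb2, hb3, PySem.List.slice_natCast, PySem.List.slice_natCast]
          simp only [PySem.List.pyGetD_natCast]
          have e1 : y * w + w - y * w = w := by omega
          have e2 : y * w + w + w - (y * w + w) = w := by omega
          rw [e1, e2]
          have hcm : h * w ≤ pb.length := by rw [Nat.mul_comm]; exact hlen
          have l1 : y * w + x < pb.length := by
            have : y * w + x < h * w := by
              calc y * w + x < y * w + w := by omega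
                _ = (y + 1) * w := by ring
                _ ≤ h * w := Nat.mul_le_mul_right w (by omega)
            omega
          have l2 : y * w + w + x < pb.length := by
            have : y * w + w + x < h * w := by
              calc y * w + w + x < y * w + w + w := by omega
                _ = (y + 2) * w := by ring
                _ ≤ h * w := Nat.mul_le_mul_right w (by omega)
            omega
          rw [getD_take_drop pb (y * w) w x hx l1,
              getD_take_drop pb (y * w + w) w x hx l2]
          have e3 : y * w + w + x = (y * w + x) + w := by omega
          rw [e3, hg]
    rw [hA]
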